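-- pv_equiv track=rewrite | github.com/mahansepanloo/kelaasor | q/exercise/views.py | groupauto
-- ===== SOURCE A (Python) =====
-- def groupauto(input_list: list, num: int):
--     ln = [[] for _ in range(num)]
--     sums = [-(len(input_list))] * num
--     l = len(input_list)
--     for item in input_list:
--         a = sums.index(min(sums))
--         ln[a].append(item)
--         sums[a] += l
--         l -= 1
--     return(ln)
-- ===== SOURCE B (Python) =====
-- def groupauto(input_list: list, num: int):
--     # Greedy assignment to strictly-decreasing weights follows a fixed
--     # boustrophedon (snake) pattern 0..num-1, num-1..0, 0..num-1, ...
--     groups = [[] for _ in range(num)]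
--     period = 2 * num
--     i = 0
--     for item in input_list:
--         r = i % period
--         a = r if r < num else period - 1 - r
--         groups[a].append(item)
--         i += 1
--     return groups
-- ===== Notes on version B (the rewrite author's own statement) =====
-- stated objective: faster
-- what changed: B replaces A's per-item argmin scan over the group sums by a closed-form boustrophedon (snake) index i % (2*num) folded back past num, which the greedy-with-strictly-decreasing-weights process provably follows, so the sums array and its min/index scans disappear.
import Mathlib
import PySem

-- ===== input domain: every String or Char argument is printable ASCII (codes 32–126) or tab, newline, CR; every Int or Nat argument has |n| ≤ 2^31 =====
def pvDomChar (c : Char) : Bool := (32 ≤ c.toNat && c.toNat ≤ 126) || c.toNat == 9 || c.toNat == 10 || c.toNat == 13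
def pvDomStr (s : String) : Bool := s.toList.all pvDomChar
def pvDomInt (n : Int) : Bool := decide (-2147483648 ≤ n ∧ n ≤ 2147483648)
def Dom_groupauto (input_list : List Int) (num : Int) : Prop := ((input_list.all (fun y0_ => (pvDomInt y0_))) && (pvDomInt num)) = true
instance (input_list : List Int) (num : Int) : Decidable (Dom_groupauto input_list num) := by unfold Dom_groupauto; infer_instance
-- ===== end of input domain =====

-- B replaces A's per-item argmin scan with the closed-form boustrophedon index the
-- greedy process provably follows: O(n+num) instead of O(n*num).

-- ===== PORT A =====
-- A's loop: pick a = sums.index(min(sums)), append item there, sums[a] += l, l -= 1.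
def groupautoLoopA : List Int → List (List Int) → List Int → Int → List (List Int)
  | [], ln, _, _ => ln
  | item :: rest, ln, sums, l =>
    match PySem.List.min? sums (fun x => x) with
    | none => ln   -- Python: min([]) raises ValueError (excluded by Pre_)
    | some m =>
      let a := (PySem.List.index? sums m).getD 0
      groupautoLoopA rest (ln.modify a (fun g => g ++ [item]))
        (sums.modify a (fun s => s + l)) (l - 1)

def groupauto (input_list : List Int) (num : Int) : List (List Int) :=
  groupautoLoopA input_list (List.replicate num.toNat [])
    (List.replicate num.toNat (-(input_list.length : Int))) (input_list.length : Int)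

-- ===== PORT B =====
-- B's loop: group index is the snake pattern r = i % (2*num); r if r < num else 2*num-1-r.
def groupautoLoopB (num : Int) : List Int → Int → List (List Int) → List (List Int)
  | [], _, groups => groups
  | item :: rest, i, groups =>
    let r := PySem.Int.mod i (2 * num)
    let a := if r < num then r else 2 * num - 1 - r
    groupautoLoopB num rest (i + 1) (groups.modify a.toNat (fun g => g ++ [item]))

def groupauto_alt (input_list : List Int) (num : Int) : List (List Int) :=
  groupautoLoopB num input_list 0 (List.replicate num.toNat [])

-- ===== PRECONDITION & SPEC =====
-- Pre_ excludes only inputs where BOTH programs raise: a nonempty list with num ≤ 0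
-- (A: ValueError from min([]); B: ZeroDivisionError/IndexError).
def Pre_groupauto (input_list : List Int) (num : Int) : Prop := input_list = [] ∨ 1 ≤ num
instance (input_list : List Int) (num : Int) : Decidable (Pre_groupauto input_list num) := by unfold Pre_groupauto; infer_instance

def pvWitness_groupauto : List Int × Int := ([3, -1, 4, 1, 5], 2)

def Spec_groupauto (input_list : List Int) (num : Int) (out : List (List Int)) : Prop := out = groupauto_alt input_list num
instance (input_list : List Int) (num : Int) (out : List (List Int)) : Decidable (Spec_groupauto input_list num out) := by unfold Spec_groupauto; infer_instance

-- ===== CLAIM (what is proved, stated in full; the proofs are below) =====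
def Claim_equal_groupauto : Prop := ∀ (input_list : List Int) (num : Int), Dom_groupauto input_list num → Pre_groupauto input_list num → Spec_groupauto input_list num (groupauto input_list num)

-- ===== LEMMAS AND PROOFS =====

-- snake index within a period of 2*k
def pvSnk (k r : Nat) : Nat := if r < k then r else 2*k - 1 - r

-- offset of group g above the round-start baseline, after r items of the round
-- (c = weight of the item at position 0 of the current round)
def pvOffs (k : Nat) (c : Int) (r g : Nat) : Int :=
  (if g < min r k then c - g else 0) +
  (if 2*k - r ≤ g then c - (2*(k:Int) - 1 - (g:Int)) else 0)

def pvSums (k : Nat) (b c : Int) (r : Nat) : List Int :=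
  (List.range k).map (fun g => b + pvOffs k c r g)

lemma pvSnk_lt (k r : Nat) (hk : 1 ≤ k) (hr : r < 2*k) : pvSnk k r < k := by
  unfold pvSnk; split_ifs <;> omega

lemma pvOffs_min (k : Nat) (c : Int) (r g : Nat) (hk : 1 ≤ k) (hr : r < 2*k)
    (hg : g < k) (hc : 1 ≤ c - r) :
    pvOffs k c r (pvSnk k r) ≤ pvOffs k c r g := by
  unfold pvOffs pvSnk
  split_ifs <;> push_cast <;> omega

lemma pvOffs_first (k : Nat) (c : Int) (r g : Nat) (hk : 1 ≤ k) (hr : r < 2*k)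
    (hg : g < k) (hc : 1 ≤ c - r) (hlt : g < pvSnk k r) :
    pvOffs k c r (pvSnk k r) < pvOffs k c r g := by
  unfold pvOffs pvSnk at *
  split_ifs at * <;> push_cast <;> omega

lemma min?_eq_of (xs : List Int) (m : Int) (hm : m ∈ xs) (hmin : ∀ y ∈ xs, m ≤ y) :
    PySem.List.min? xs (fun x => x) = some m := by
  cases h : PySem.List.min? xs (fun x => x) with
  | none =>
    rw [PySem.List.min?_eq_none_iff] at h
    subst h; simp at hm
  | some m' =>
    have h1 := PySem.List.min?_mem h
    have h2 := PySem.List.min?_isMin h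
    have := le_antisymm (h2 m hm) (hmin m' h1)
    rw [this]

lemma map_range_decomp (k a : Nat) (f : Nat → Int) (ha : a < k) :
    (List.range k).map f = (List.range a).map f ++ f a :: ((List.range k).map f).drop (a+1) := by
  conv_lhs => rw [← List.take_append_drop a ((List.range k).map f)]
  congr 1
  · rw [← List.map_take, List.take_range, Nat.min_eq_left ha.le]
  · rw [List.drop_eq_getElem_cons (by simpa using ha)]
    congr 1
    simp

lemma index?_map_range_eq (k a : Nat) (f : Nat → Int) (ha : a < k)
    (hfirst : ∀ g, g < a → f g ≠ f a) :
    PySem.List.index? ((List.range k).map f) (f a) = some a := by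
  rw [PySem.List.index?_eq_some_iff]
  refine ⟨(List.range a).map f, ((List.range k).map f).drop (a+1), ?_, by simp, ?_⟩
  · exact map_range_decomp k a f ha
  · simp only [List.mem_map, List.mem_range, not_exists]
    rintro g ⟨hg, hfg⟩
    exact hfirst g hg hfg

lemma pvSums_step_mid (k : Nat) (b c : Int) (r : Nat) (hk : 1 ≤ k) (hr : r < 2*k)
    (hc : 1 ≤ c - r) (hr2 : r + 1 < 2*k) :
    (pvSums k b c r).modify (pvSnk k r) (· + (c - r)) = pvSums k b c (r+1) := by
  apply List.ext_getElem
  · simp [pvSums]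
  · intro g h1 h2
    simp only [pvSums, List.getElem_modify, List.getElem_map, List.getElem_range]
    have hg : g < k := by simpa [pvSums] using h2
    unfold pvOffs pvSnk
    split_ifs <;> push_cast <;> omega

lemma pvSums_step_roll (k : Nat) (b c : Int) (r : Nat) (hk : 1 ≤ k) (hr : r < 2*k)
    (hc : 1 ≤ c - r) (hr2 : r + 1 = 2*k) :
    (pvSums k b c r).modify (pvSnk k r) (· + (c - r))
      = pvSums k (b + (2*c - 2*(k:Int) + 1)) (c - 2*k) 0 := by
  apply List.ext_getElem
  · simp [pvSums]
  · intro g h1 h2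
    simp only [pvSums, List.getElem_modify, List.getElem_map, List.getElem_range]
    have hg : g < k := by simpa [pvSums] using h2
    unfold pvOffs pvSnk
    split_ifs <;> push_cast <;> omega

lemma pvSums_zero (k : Nat) (b c : Int) : pvSums k b c 0 = List.replicate k b := by
  apply List.ext_getElem
  · simp [pvSums]
  · intro g h1 h2
    simp only [pvSums, List.getElem_map, List.getElem_range, List.getElem_replicate]
    have hg : g < k := by simpa [pvSums] using h1
    unfold pvOffs
    split_ifs <;> push_cast <;> omega

lemma loop_eq (k : Nat) (hk : 1 ≤ k) (xs : List Int) :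
    ∀ (r t : Nat) (b c : Int) (gs : List (List Int)),
    r < 2*k → (xs.length : Int) ≤ c - r →
    groupautoLoopA xs gs (pvSums k b c r) (c - r)
      = groupautoLoopB (k : Int) xs ((2*k*t + r : Nat) : Int) gs := by
  induction xs with
  | nil => intro r t b c gs _ _; rfl
  | cons x rest ih =>
    intro r t b c gs hr hlen
    have hc : 1 ≤ c - r := by
      have : (0:Int) ≤ rest.length := by positivity
      simp [List.length_cons] at hlen; omega
    have ha := pvSnk_lt k r hk hr
    set a := pvSnk k r with hadef
    set f : Nat → Int := fun g => b + pvOffs k c r g with hf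
    -- A side: min and its first index
    have hmem : f a ∈ pvSums k b c r := by
      simp only [pvSums, List.mem_map]; exact ⟨a, by simp [List.mem_range, ha], rfl⟩
    have hminval : ∀ y ∈ pvSums k b c r, f a ≤ y := by
      intro y hy
      simp only [pvSums, List.mem_map, List.mem_range] at hy
      obtain ⟨g, hg, rfl⟩ := hy
      have h5 := pvOffs_min k c r g hk hr hg hc
      rw [← hadef] at h5
      simp only [hf]; omega
    have hmin : PySem.List.min? (pvSums k b c r) (fun x => x) = some (f a) :=
      min?_eq_of _ _ hmem hminval
    have hidx : PySem.List.index? (pvSums k b c r) (f a) = some a := by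
      have : pvSums k b c r = (List.range k).map f := rfl
      rw [this]
      apply index?_map_range_eq k a f ha
      intro g hg
      have h5 := pvOffs_first k c r g hk hr (by omega) hc ?_
      · rw [← hadef] at h5
        simp only [hf]
        intro hcon
        omega
      · rw [hadef] at hg; exact hg
    -- B side: computed index equals a
    have hmodB : PySem.Int.mod ((2*k*t + r : Nat) : Int) (2 * (k:Int))
        = ((2*k*t + r : Nat) % (2*k) : Nat) := by
      have := PySem.Int.mod_natCast (2*k*t + r) (2*k)
      push_cast at this ⊢
      convert this using 2 <;> push_cast <;> ring
    have hmodNat : (2*k*t + r) % (2*k) = r := by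
      rw [Nat.mul_add_mod]; exact Nat.mod_eq_of_lt hr
    have hBidx : (if PySem.Int.mod ((2*k*t + r : Nat) : Int) (2 * (k:Int)) < (k:Int)
          then PySem.Int.mod ((2*k*t + r : Nat) : Int) (2 * (k:Int))
          else 2 * (k:Int) - 1 - PySem.Int.mod ((2*k*t + r : Nat) : Int) (2 * (k:Int))).toNat = a := by
      rw [hmodB, hmodNat, hadef]
      unfold pvSnk
      split_ifs with h1 h2 h2 <;> push_cast at h1 h2 ⊢ <;> omega
    -- unfold one step of each loop
    rw [groupautoLoopA, groupautoLoopB]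
    simp only [hmin, hidx, Option.getD_some, hBidx]
    -- the two group updates coincide; rewrite next state and apply ih
    rcases Nat.lt_or_ge (r+1) (2*k) with hmid | hroll
    · rw [pvSums_step_mid k b c r hk hr hc hmid]
      have hl : c - r - 1 = c - (r+1 : Nat) := by push_cast; ring
      have hi : ((2*k*t + r : Nat) : Int) + 1 = ((2*k*t + (r+1) : Nat) : Int) := by
        push_cast; ring
      rw [hl, hi]
      apply ih (r+1) t b c _ hmid
      simp [List.length_cons] at hlen; push_cast at hlen ⊢; omega
    · have hroll' : r + 1 = 2*k := by omega
      rw [pvSums_step_roll k b c r hk hr hc hroll']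
      have hl : c - r - 1 = (c - 2*k) - (0 : Nat) := by push_cast; omega
      have hiNat : 2*k*t + r + 1 = 2*k*(t+1) + 0 := by
        have hx : 2*k*(t+1) = 2*k*t + 2*k := by ring
        omega
      have hi : ((2*k*t + r : Nat) : Int) + 1 = ((2*k*(t+1) + 0 : Nat) : Int) := by
        rw [← hiNat]; omega
      rw [hl, hi]
      apply ih 0 (t+1) (b + (2*c - 2*(k:Int) + 1)) (c - 2*k) _ (by omega)
      simp [List.length_cons] at hlen; push_cast at hlen ⊢; omega

-- ===== VERDICT (by name: the statement is the Claim_ definition above) =====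
theorem groupauto_spec : Claim_equal_groupauto := by
  intro xs num _ hpre
  show groupauto xs num = groupauto_alt xs num
  rcases hpre with h | h
  · subst h; rfl
  · have hk : 1 ≤ num.toNat := by omega
    have hnum : ((num.toNat : Int)) = num := Int.toNat_of_nonneg (by omega)
    unfold groupauto groupauto_alt
    have h0 := loop_eq num.toNat hk xs 0 0 (-(xs.length : Int)) (xs.length : Int)
      (List.replicate num.toNat []) (by omega) (by simp)
    rw [pvSums_zero] at h0
    simpa [hnum] using h0
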